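-- pv_equiv track=rewrite | github.com/guswns7452/coding_test | Algorithm_study/Heap/06_25/More Spicy.py | solution
-- ===== SOURCE A (Python) =====
-- import heapq
--
-- def solution(scoville, K):
--     h = []
--     answer = 0
--
--     # 차례대로 힙에 삽입
--     for i in scoville:
--         heapq.heappush(h, i)
--
--     while (1):
--         new_scoville = 0
--         first = heapq.heappop(h)
--
--         # 가장 작은 수가 K보다 크면 Return
--         if first >= K:
--             return answer
--
--         # 만약 Heap에서 다 빼서, 힙이 비었으면 -1 Return
--         elif len(h) == 0:
--             return -1
--
--         new_scoville = first + (heapq.heappop(h) * 2)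
--         heapq.heappush(h, new_scoville)
--         answer += 1
--
-- scoville = [1,2,3,9,10,12]
-- ===== SOURCE B (Python) =====
-- def solution(scoville, K):
--     # plain list with repeated min-scans instead of a heap; same greedy order
--     lst = list(scoville)
--     answer = 0
--     while True:
--         first = min(lst)
--         if first >= K:
--             return answer
--         lst.remove(first)
--         if not lst:
--             return -1
--         second = min(lst)
--         lst.remove(second)
--         lst.append(first + second * 2)
--         answer += 1
-- ===== Notes on version B (the rewrite author's own statement) =====
-- stated objective: simpler
-- what changed: Replaces the heapq binary heap with a plain list scanned with min() and pruned with remove() each round, keeping the same greedy mix order and count.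
import Mathlib
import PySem

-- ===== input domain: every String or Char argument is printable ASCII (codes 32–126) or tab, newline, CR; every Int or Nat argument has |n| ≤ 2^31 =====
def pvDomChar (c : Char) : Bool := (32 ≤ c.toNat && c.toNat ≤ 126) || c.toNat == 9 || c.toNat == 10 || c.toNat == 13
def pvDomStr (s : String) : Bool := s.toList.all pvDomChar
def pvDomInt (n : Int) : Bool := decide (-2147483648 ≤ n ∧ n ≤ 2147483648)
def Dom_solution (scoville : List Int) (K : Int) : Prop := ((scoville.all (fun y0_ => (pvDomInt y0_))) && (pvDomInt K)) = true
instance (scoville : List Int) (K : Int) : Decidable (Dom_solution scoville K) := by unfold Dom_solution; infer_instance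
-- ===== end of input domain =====

-- B replaces A's heapq priority queue by a plain list with repeated min-scans (same greedy order and count); objective: simpler.

-- ===== PORT A =====
-- heapq on a list of Ints is ported by its priority-queue contract: the heap is kept as a
-- list sorted ascending; heappush = ordered insertion, heappop = take the head.  Elements
-- are plain Ints, so equal elements are indistinguishable and this is value-exact.
def heappushA (h : List Int) (v : Int) : List Int := List.orderedInsert (· ≤ ·) v h

-- the while(1) loop of A; the [] case is Python's IndexError on heappop (excluded by Pre_)
def loopA : List Int → Int → Int → Int
  | [], _, _ => 0
  | first :: rest, answer, K =>
    if first ≥ K then answer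
    else
      match rest with
      | [] => -1
      | second :: rest2 =>
          loopA (heappushA rest2 (first + second * 2)) (answer + 1) K
termination_by h => h.length
decreasing_by simp [heappushA, List.orderedInsert_length]

def solution (scoville : List Int) (K : Int) : Int :=
  loopA (scoville.foldl heappushA []) 0 K

-- ===== PORT B =====
-- length bookkeeping for remove?, used by loopB's termination proof
lemma removeLen {xs ys : List Int} {v : Int} (h : PySem.List.remove? xs v = some ys) :
    ys.length + 1 = xs.length := by
  have hv : v ∈ xs := by
    by_contra hn
    rw [(PySem.List.remove?_eq_none_iff xs v).mpr hn] at h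
    simp at h
  rw [PySem.List.remove?_eq_some_erase xs v hv] at h
  cases h
  have := List.length_erase_of_mem hv
  have : 1 ≤ xs.length := List.length_pos_of_mem hv
  simp [List.length_erase_of_mem hv]
  omega

-- the while True loop of Source B: min(lst) / lst.remove(...) / append; the `none` branches are
-- where Python would raise (min of empty list) or are unreachable (removing a member)
def loopB (lst : List Int) (answer : Int) (K : Int) : Int :=
  match PySem.List.min? lst (fun y => y) with
  | none => 0
  | some first =>
    if first ≥ K then answer
    else
      match hr : PySem.List.remove? lst first with
      | none => 0
      | some lst1 =>
        if lst1 = [] then -1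
        else
          match PySem.List.min? lst1 (fun y => y) with
          | none => 0
          | some second =>
            match hr2 : PySem.List.remove? lst1 second with
            | none => 0
            | some lst2 =>
              loopB (lst2 ++ [first + second * 2]) (answer + 1) K
termination_by lst.length
decreasing_by
  have h1 := removeLen hr
  have h2 := removeLen hr2
  simp
  omega

def solution_alt (scoville : List Int) (K : Int) : Int :=
  loopB scoville 0 K

-- ===== PRECONDITION & SPEC =====
-- Pre_ excludes only the empty list, on which A raises IndexError (heappop from an empty heap).
def Pre_solution (scoville : List Int) (K : Int) : Prop := scoville ≠ []
instance (scoville : List Int) (K : Int) : Decidable (Pre_solution scoville K) := by unfold Pre_solution; infer_instance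
def pvWitness_solution : List Int × Int := ([1, 2, 3, 9, 10, 12], 7)

def Spec_solution (scoville : List Int) (K : Int) (out : Int) : Prop := out = solution_alt scoville K
instance (scoville : List Int) (K : Int) (out : Int) : Decidable (Spec_solution scoville K out) := by unfold Spec_solution; infer_instance

-- ===== CLAIM (what is proved, stated in full; the proofs are below) =====
def Claim_equal_solution : Prop := ∀ (scoville : List Int) (K : Int), Dom_solution scoville K → Pre_solution scoville K → Spec_solution scoville K (solution scoville K)

-- ===== LEMMAS AND PROOFS =====

-- unfolding equations for the two loops
lemma loopA_nil (a K : Int) : loopA [] a K = 0 := by rw [loopA.eq_def]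

lemma loopA_one (first a K : Int) :
    loopA [first] a K = if first ≥ K then a else -1 := by
  rw [loopA.eq_def]

lemma loopA_cons2 (first second : Int) (rest2 : List Int) (a K : Int) :
    loopA (first :: second :: rest2) a K =
      if first ≥ K then a
      else loopA (heappushA rest2 (first + second * 2)) (a + 1) K := by
  rw [loopA.eq_def]

lemma loopB_nil (a K : Int) : loopB [] a K = 0 := by rw [loopB]; rfl

-- A's heap list stays sorted and is a permutation of everything pushed
lemma build_sorted : ∀ (l acc : List Int), acc.Pairwise (· ≤ ·) →
    (l.foldl heappushA acc).Pairwise (· ≤ ·)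
  | [], _, h => h
  | x :: l, acc, h => build_sorted l _ (List.Pairwise.orderedInsert x acc h)

lemma build_perm : ∀ (l acc : List Int), (l.foldl heappushA acc).Perm (acc ++ l)
  | [], acc => by simp
  | x :: l, acc => by
    have h1 : (List.foldl heappushA (heappushA acc x) l).Perm (heappushA acc x ++ l) :=
      build_perm l _
    refine h1.trans ?_
    have h2 : (heappushA acc x).Perm (x :: acc) := List.perm_orderedInsert _ x acc
    exact (h2.append_right l).trans List.perm_middle.symm

-- main invariant: A's loop on a sorted list equals B's loop on any permutation of it
lemma loop_eq : ∀ (n : Nat) (h t : List Int) (a K : Int), h.length = n →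
    h.Pairwise (· ≤ ·) → h.Perm t → loopA h a K = loopB t a K := by
  intro n
  induction n using Nat.strong_induction_on with
  | _ n ih =>
    intro h t a K hlen hs hp
    cases h with
    | nil =>
      have ht : t = [] := hp.symm.eq_nil
      subst ht
      rw [loopA_nil, loopB_nil]
    | cons first rest =>
      have hmem : first ∈ t := hp.mem_iff.mp (by simp)
      have htne : t ≠ [] := by rintro rfl; simp at hmem
      obtain ⟨m, hm⟩ : ∃ m, PySem.List.min? t (fun y => y) = some m := by
        cases hmt : PySem.List.min? t (fun y => y) with
        | none => exact absurd ((PySem.List.min?_eq_none_iff t _).mp hmt) htne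
        | some m => exact ⟨m, rfl⟩
      have hmfirst : m = first := by
        have h1 : m ≤ first := PySem.List.min?_isMin hm first hmem
        have h2 : first ≤ m := by
          have hmmem : m ∈ first :: rest := hp.mem_iff.mpr (PySem.List.min?_mem hm)
          rcases List.mem_cons.mp hmmem with heq | hmr
          · omega
          · exact (List.pairwise_cons.mp hs).1 m hmr
        omega
      rw [hmfirst] at hm
      rw [loopB, hm]
      -- dispose of the (already determined) outer min? match
      split
      · rename_i heq
        exact absurd heq (by simp)
      · rename_i val heq
        injection heq with hval
        subst hval
        have hrem : PySem.List.remove? t first = some (t.erase first) :=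
          PySem.List.remove?_eq_some_erase t first hmem
        by_cases hK : first ≥ K
        · rw [if_pos hK]
          cases rest with
          | nil => rw [loopA_one]; simp [hK]
          | cons second rest2 => rw [loopA_cons2]; simp [hK]
        · rw [if_neg hK]
          have hperm1 : (t.erase first).Perm rest := by
            have := (hp.erase first).symm
            simpa using this
          cases rest with
          | nil =>
            have hnil : t.erase first = [] := hperm1.eq_nil
            rw [loopA_one, if_neg hK]
            split
            · rename_i heq1
              rw [hrem] at heq1
              simp at heq1
            · rename_i lst1 heq1
              rw [hrem] at heq1
              injection heq1 with h1
              subst h1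
              simp [hnil]
          | cons second rest2 =>
            have hne1 : t.erase first ≠ [] := by
              intro h0
              rw [h0] at hperm1
              exact absurd hperm1.symm.eq_nil (by simp)
            have hsmem : second ∈ t.erase first := hperm1.mem_iff.mpr (by simp)
            obtain ⟨m2, hm2⟩ : ∃ m2, PySem.List.min? (t.erase first) (fun y => y) = some m2 := by
              cases hmt : PySem.List.min? (t.erase first) (fun y => y) with
              | none => exact absurd ((PySem.List.min?_eq_none_iff _ _).mp hmt) hne1
              | some m2 => exact ⟨m2, rfl⟩
            have hs' : (second :: rest2).Pairwise (· ≤ ·) := (List.pairwise_cons.mp hs).2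
            have hm2second : m2 = second := by
              have h1 : m2 ≤ second := PySem.List.min?_isMin hm2 second hsmem
              have h2 : second ≤ m2 := by
                rcases List.mem_cons.mp (hperm1.mem_iff.mp (PySem.List.min?_mem hm2)) with heq2 | hmr
                · omega
                · exact (List.pairwise_cons.mp hs').1 m2 hmr
              omega
            rw [hm2second] at hm2
            have hrem2 : PySem.List.remove? (t.erase first) second
                = some ((t.erase first).erase second) :=
              PySem.List.remove?_eq_some_erase _ second hsmem
            have hperm2 : ((t.erase first).erase second).Perm rest2 := by
              have := hperm1.erase second
              simpa using this
            rw [loopA_cons2, if_neg hK]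
            split
            · rename_i heq1
              rw [hrem] at heq1
              simp at heq1
            · rename_i lst1 heq1
              rw [hrem] at heq1
              injection heq1 with h1
              subst h1
              rw [if_neg hne1, hm2]
              -- dispose of the inner min? match
              split
              · rename_i heq2
                exact absurd heq2 (by simp)
              · rename_i val2 heq2
                injection heq2 with hval2
                subst hval2
                split
                · rename_i heq3
                  rw [hrem2] at heq3
                  simp at heq3
                · rename_i lst2 heq3
                  rw [hrem2] at heq3
                  injection heq3 with h3
                  subst h3
                  have hlen2 : (heappushA rest2 (first + second * 2)).length = rest2.length + 1 := by
                    simp [heappushA, List.orderedInsert_length]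
                  apply ih (rest2.length + 1) (by simp at hlen; omega)
                  · exact hlen2
                  · exact List.Pairwise.orderedInsert _ _ hs'.of_cons
                  · have p1 : (heappushA rest2 (first + second * 2)).Perm
                        ((first + second * 2) :: rest2) := List.perm_orderedInsert _ _ _
                    have p2 := p1.trans (List.Perm.cons (first + second * 2) hperm2.symm)
                    exact p2.trans (List.perm_append_singleton _ _).symm

-- ===== VERDICT (by name: the statement is the Claim_ definition above) =====
theorem solution_spec : Claim_equal_solution := by
  intro scoville K _ _
  unfold Spec_solution solution solution_alt
  exact loop_eq (scoville.foldl heappushA []).length _ scoville 0 K rfl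
    (build_sorted scoville [] (by simp))
    (by simpa using build_perm scoville [])
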